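-- pv_equiv track=rewrite | github.com/anwashsaleem/Snapture | snapture_v0.3.1.py | parse_caption
-- ===== SOURCE A (Python) =====
-- def parse_caption(caption_response):
--     lines = caption_response.splitlines()
--     title = ""
--     description = ""
--     tags = []
--     for line in lines:
--         if line.startswith("Title:"):
--             title = line.split(":", 1)[1].strip()
--         elif line.startswith("Description:"):
--             description = line.split(":", 1)[1].strip()
--         elif line.startswith("Tags:"):
--             tags = [tag.strip() for tag in line.split(":", 1)[1].split(",") if tag.strip()]
--     return title, description, tags
-- ===== SOURCE B (Python) =====
-- def parse_caption(caption_response):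
--     # Phase 1: parse every "key: value" line into a table (last occurrence wins).
--     fields = {}
--     for line in caption_response.splitlines():
--         key, sep, value = line.partition(":")
--         if sep:
--             fields[key] = value
--     # Phase 2: select and post-process the three fields.
--     title = fields.get("Title", "").strip()
--     description = fields.get("Description", "").strip()
--     tags = [t.strip() for t in fields.get("Tags", "").split(",") if t.strip()]
--     return title, description, tags
-- ===== Notes on version B (the rewrite author's own statement) =====
-- stated objective: simpler
-- what changed: Replaces the per-line startswith if/elif dispatch with a two-phase design: one pass partitions every line at its first ':' into a key->value dict (last occurrence wins by overwrite), then the three fields are selected and post-processed from the dict.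
import Mathlib
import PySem

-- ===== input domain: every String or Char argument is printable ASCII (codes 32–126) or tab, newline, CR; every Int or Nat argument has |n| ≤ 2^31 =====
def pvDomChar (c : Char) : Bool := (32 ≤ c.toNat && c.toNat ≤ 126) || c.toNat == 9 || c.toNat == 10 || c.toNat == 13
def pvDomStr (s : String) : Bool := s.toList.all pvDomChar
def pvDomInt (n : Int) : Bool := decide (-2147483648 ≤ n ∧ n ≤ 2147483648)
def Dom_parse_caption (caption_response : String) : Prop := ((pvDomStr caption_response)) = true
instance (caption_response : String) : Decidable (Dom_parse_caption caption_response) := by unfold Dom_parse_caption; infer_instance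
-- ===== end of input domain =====

-- B replaces A's per-line if/elif field dispatch with a two-phase design (partition all lines into a dict, then select the three fields); same cost, simpler decomposition.


-- ===== PORT A =====
-- one iteration of A's for-loop over the lines: three-way startswith dispatch updating (title, description, tags)
def pcStepA (st : List Char × List Char × List (List Char)) (line : List Char) :
    List Char × List Char × List (List Char) :=
  if PySem.Chars.startswith line ("Title:".toList) then
    (PySem.Chars.strip (PySem.List.pyGetD (PySem.Chars.splitOnMax line [':'] 1) 1 []), st.2.1, st.2.2)
  else if PySem.Chars.startswith line ("Description:".toList) then
    (st.1, PySem.Chars.strip (PySem.List.pyGetD (PySem.Chars.splitOnMax line [':'] 1) 1 []), st.2.2)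
  else if PySem.Chars.startswith line ("Tags:".toList) then
    (st.1, st.2.1,
      ((PySem.Chars.splitOn (PySem.List.pyGetD (PySem.Chars.splitOnMax line [':'] 1) 1 []) [',']).map
          PySem.Chars.strip).filter (fun t => !t.isEmpty))
  else st

def parse_caption (caption_response : String) : String × String × List String :=
  let lines := PySem.Chars.splitlines caption_response.toList
  let r := lines.foldl pcStepA ([], [], [])
  (String.mk r.1, String.mk r.2.1, r.2.2.map String.mk)

-- ===== PORT B =====
-- hand port of Python's line.partition(":"): none = ':' absent; some (k, v) = pieces before/after the FIRST ':' (exact for a 1-char separator)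
def pvPartitionColon : List Char → Option (List Char × List Char)
  | [] => none
  | c :: rest =>
      if c = ':' then some ([], rest)
      else (pvPartitionColon rest).map (fun p => (c :: p.1, p.2))

-- one iteration of B's first phase: store key -> raw value (overwrite = last occurrence wins)
def pcStepB (d : PySem.Dict (List Char) (List Char)) (line : List Char) :
    PySem.Dict (List Char) (List Char) :=
  match pvPartitionColon line with
  | some (k, v) => d.insert k v
  | none => d

def parse_caption_alt (caption_response : String) : String × String × List String :=
  let fields := (PySem.Chars.splitlines caption_response.toList).foldl pcStepB PySem.Dict.empty
  let title := PySem.Chars.strip (fields.getD ("Title".toList) [])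
  let description := PySem.Chars.strip (fields.getD ("Description".toList) [])
  let tags := ((PySem.Chars.splitOn (fields.getD ("Tags".toList) []) [',']).map
      PySem.Chars.strip).filter (fun t => !t.isEmpty)
  (String.mk title, String.mk description, tags.map String.mk)

-- ===== PRECONDITION & SPEC =====
def Spec_parse_caption (caption_response : String) (out : String × String × List String) : Prop := out = parse_caption_alt caption_response
instance (caption_response : String) (out : String × String × List String) : Decidable (Spec_parse_caption caption_response out) := by unfold Spec_parse_caption; infer_instance

-- ===== CLAIM (what is proved, stated in full; the proofs are below) =====
def Claim_equal_parse_caption : Prop := ∀ (caption_response : String), Dom_parse_caption caption_response → Spec_parse_caption caption_response (parse_caption caption_response)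

-- ===== LEMMAS AND PROOFS =====

-- B's second phase, as a function of the dict (what the three selected fields evaluate to)
def pcExtract (d : PySem.Dict (List Char) (List Char)) :
    List Char × List Char × List (List Char) :=
  (PySem.Chars.strip (d.getD ("Title".toList) []),
   PySem.Chars.strip (d.getD ("Description".toList) []),
   ((PySem.Chars.splitOn (d.getD ("Tags".toList) []) [',']).map PySem.Chars.strip).filter
     (fun t => !t.isEmpty))

theorem pvPartitionColon_none {l : List Char} (h : pvPartitionColon l = none) : ':' ∉ l := by
  induction l with
  | nil => simp
  | cons c rest ih =>
    by_cases hc : c = ':'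
    · simp [pvPartitionColon, hc] at h
    · simp only [pvPartitionColon, if_neg hc, Option.map_eq_none_iff] at h
      intro hm
      rcases List.mem_cons.mp hm with h1 | h1
      · exact hc h1.symm
      · exact ih h h1

theorem pvPartitionColon_some {l k v : List Char} (h : pvPartitionColon l = some (k, v)) :
    l = k ++ ':' :: v ∧ ':' ∉ k := by
  induction l generalizing k with
  | nil => simp [pvPartitionColon] at h
  | cons c rest ih =>
    by_cases hc : c = ':'
    · simp [pvPartitionColon, hc] at h
      obtain ⟨h1, h2⟩ := h
      subst h1; subst h2
      simp [hc]
    · simp only [pvPartitionColon, if_neg hc, Option.map_eq_some_iff] at h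
      obtain ⟨⟨k', v'⟩, hp, heq⟩ := h
      rw [Prod.mk.injEq] at heq
      obtain ⟨hk1, hv1⟩ := heq
      subst hv1
      obtain ⟨hl, hnk⟩ := ih hp
      subst hl
      subst hk1
      refine ⟨by simp, ?_⟩
      simp [hnk]
      exact fun h => hc h.symm

theorem prefix_colon_iff {k t : List Char} (v : List Char) (hk : ':' ∉ k) (ht : ':' ∉ t) :
    (t ++ [':']) <+: (k ++ ':' :: v) ↔ t = k := by
  constructor
  · intro h
    induction t generalizing k with
    | nil =>
      cases k with
      | nil => rfl
      | cons c k' =>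
        exfalso
        obtain ⟨r, hr⟩ := h
        simp at hr
        exact hk (by simp [← hr.1])
    | cons a t' iht =>
      cases k with
      | nil =>
        exfalso
        obtain ⟨r, hr⟩ := h
        simp at hr
        exact ht (by simp [hr.1])
      | cons c k' =>
        obtain ⟨r, hr⟩ := h
        simp at hr
        obtain ⟨hac, hr'⟩ := hr
        have : t' = k' := by
          apply iht (fun hm => hk (by simp [hm])) (fun hm => ht (by simp [hm]))
          exact ⟨r, by simpa using hr'⟩
        simp [hac, this]
  · rintro rfl
    exact ⟨v, by simp⟩

-- splitOnMax.go with maxsplit 0 returns the remainder as one piece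
theorem go_msplit_zero (fuel : Nat) (v cur : List Char) (acc : List (List Char)) :
    PySem.Chars.splitOnMax.go [':'] fuel 0 v cur acc = ((cur.reverse ++ v) :: acc).reverse := by
  cases fuel with
  | zero => simp [PySem.Chars.splitOnMax.go]
  | succ f =>
    cases v with
    | nil => simp [PySem.Chars.splitOnMax.go]
    | cons c rest => simp [PySem.Chars.splitOnMax.go]

theorem go_colon (k : List Char) : ∀ (fuel : Nat) (v cur : List Char) (acc : List (List Char)),
    k.length + 1 ≤ fuel → ':' ∉ k →
    PySem.Chars.splitOnMax.go [':'] fuel 1 (k ++ ':' :: v) cur acc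
      = acc.reverse ++ [cur.reverse ++ k, v] := by
  induction k with
  | nil =>
    intro fuel v cur acc hf _
    match fuel, hf with
    | (f + 1), _ =>
      simp only [List.nil_append]
      rw [show PySem.Chars.splitOnMax.go [':'] (f + 1) 1 (':' :: v) cur acc
            = PySem.Chars.splitOnMax.go [':'] f 0 (List.drop 1 (':' :: v)) [] (cur.reverse :: acc) by
          simp [PySem.Chars.splitOnMax.go, List.isPrefixOf]]
      rw [go_msplit_zero]
      simp
  | cons c k' ih =>
    intro fuel v cur acc hf hk
    match fuel, hf with
    | (f + 1), hf =>
      have hc : c ≠ ':' := fun h => hk (by simp [h])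
      rw [show PySem.Chars.splitOnMax.go [':'] (f + 1) 1 ((c :: k') ++ ':' :: v) cur acc
            = PySem.Chars.splitOnMax.go [':'] f 1 (k' ++ ':' :: v) (c :: cur) acc by
          simp [PySem.Chars.splitOnMax.go, List.isPrefixOf,
            show ¬(':' = c) from fun h => hc h.symm]]
      rw [ih f v (c :: cur) acc (by simpa using hf) (fun h => hk (by simp [h]))]
      simp

theorem splitOnMax_colon {k v : List Char} (hk : ':' ∉ k) :
    PySem.Chars.splitOnMax (k ++ ':' :: v) [':'] 1 = [k, v] := by
  rw [PySem.Chars.splitOnMax]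
  rw [if_neg (by norm_num), show Int.toNat 1 = 1 from rfl]
  rw [go_colon k _ v [] [] (by simp) hk]
  simp

-- the key-comparison facts used below
theorem startswith_key_self {k v : List Char} (hk : ':' ∉ k) :
    PySem.Chars.startswith (k ++ ':' :: v) (k ++ [':']) = true := by
  simp only [PySem.Chars.startswith, List.isPrefixOf_iff_prefix]
  exact ⟨v, by simp⟩

theorem startswith_key_ne {k v t : List Char} (hk : ':' ∉ k) (ht : ':' ∉ t) (h : t ≠ k) :
    PySem.Chars.startswith (k ++ ':' :: v) (t ++ [':']) = false := by
  rw [Bool.eq_false_iff]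
  intro hpre
  exact h ((prefix_colon_iff v hk ht).mp
    (by simpa [PySem.Chars.startswith, List.isPrefixOf_iff_prefix] using hpre))

theorem startswith_no_colon {l t : List Char} (hl : ':' ∉ l) (ht : ':' ∈ t) :
    PySem.Chars.startswith l t = false := by
  by_contra h
  simp [PySem.Chars.startswith, List.isPrefixOf_iff_prefix] at h
  exact hl (h.subset ht)

-- one line: A's state update mirrors B's dict update through pcExtract
theorem step_commutes (d : PySem.Dict (List Char) (List Char)) (line : List Char) :
    pcStepA (pcExtract d) line = pcExtract (pcStepB d line) := by
  cases hp : pvPartitionColon line with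
  | none =>
    have hnc : ':' ∉ line := pvPartitionColon_none hp
    have s1 : PySem.Chars.startswith line ['T', 'i', 't', 'l', 'e', ':'] = false :=
      startswith_no_colon hnc (by decide)
    have s2 : PySem.Chars.startswith line
        ['D', 'e', 's', 'c', 'r', 'i', 'p', 't', 'i', 'o', 'n', ':'] = false :=
      startswith_no_colon hnc (by decide)
    have s3 : PySem.Chars.startswith line ['T', 'a', 'g', 's', ':'] = false :=
      startswith_no_colon hnc (by decide)
    simp [pcStepA, pcStepB, hp, s1, s2, s3]
  | some p =>
    obtain ⟨k, v⟩ := p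
    obtain ⟨hl, hk⟩ := pvPartitionColon_some hp
    subst hl
    by_cases h1 : (['T', 'i', 't', 'l', 'e'] : List Char) = k
    · subst h1
      have s1 : PySem.Chars.startswith ('T' :: 'i' :: 't' :: 'l' :: 'e' :: ':' :: v)
          ['T', 'i', 't', 'l', 'e', ':'] = true :=
        startswith_key_self (k := ['T', 'i', 't', 'l', 'e']) (v := v) (by decide)
      have hget : PySem.List.pyGetD
          (PySem.Chars.splitOnMax ('T' :: 'i' :: 't' :: 'l' :: 'e' :: ':' :: v) [':'] 1) 1 [] = v := by
        rw [show ('T' :: 'i' :: 't' :: 'l' :: 'e' :: ':' :: v : List Char)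
              = ['T', 'i', 't', 'l', 'e'] ++ ':' :: v from rfl,
          splitOnMax_colon (by decide)]
        rfl
      have g2 : (d.insert ['T', 'i', 't', 'l', 'e'] v).getD
          ['D', 'e', 's', 'c', 'r', 'i', 'p', 't', 'i', 'o', 'n'] []
            = d.getD ['D', 'e', 's', 'c', 'r', 'i', 'p', 't', 'i', 'o', 'n'] [] :=
        PySem.Dict.getD_insert_of_ne d _ _ (by decide)
      have g3 : (d.insert ['T', 'i', 't', 'l', 'e'] v).getD ['T', 'a', 'g', 's'] []
            = d.getD ['T', 'a', 'g', 's'] [] :=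
        PySem.Dict.getD_insert_of_ne d _ _ (by decide)
      have hp' : pvPartitionColon ('T' :: 'i' :: 't' :: 'l' :: 'e' :: ':' :: v) = some (['T', 'i', 't', 'l', 'e'], v) := hp
      simp [pcStepA, pcStepB, pcExtract, hp', s1, hget, g2, g3, PySem.Dict.getD_insert_self]
    · by_cases h2 : (['D', 'e', 's', 'c', 'r', 'i', 'p', 't', 'i', 'o', 'n'] : List Char) = k
      · subst h2
        have s1 : PySem.Chars.startswith
            ('D' :: 'e' :: 's' :: 'c' :: 'r' :: 'i' :: 'p' :: 't' :: 'i' :: 'o' :: 'n' :: ':' :: v)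
            ['T', 'i', 't', 'l', 'e', ':'] = false :=
          startswith_key_ne (k := ['D', 'e', 's', 'c', 'r', 'i', 'p', 't', 'i', 'o', 'n']) (v := v) (t := ['T', 'i', 't', 'l', 'e']) (by decide) (by decide) (by decide)
        have s2 : PySem.Chars.startswith
            ('D' :: 'e' :: 's' :: 'c' :: 'r' :: 'i' :: 'p' :: 't' :: 'i' :: 'o' :: 'n' :: ':' :: v)
            ['D', 'e', 's', 'c', 'r', 'i', 'p', 't', 'i', 'o', 'n', ':'] = true :=
          startswith_key_self (k := ['D', 'e', 's', 'c', 'r', 'i', 'p', 't', 'i', 'o', 'n']) (v := v) (by decide)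
        have hget : PySem.List.pyGetD
            (PySem.Chars.splitOnMax
              ('D' :: 'e' :: 's' :: 'c' :: 'r' :: 'i' :: 'p' :: 't' :: 'i' :: 'o' :: 'n' :: ':' :: v)
              [':'] 1) 1 [] = v := by
          rw [show ('D' :: 'e' :: 's' :: 'c' :: 'r' :: 'i' :: 'p' :: 't' :: 'i' :: 'o' :: 'n' :: ':' :: v : List Char)
                = ['D', 'e', 's', 'c', 'r', 'i', 'p', 't', 'i', 'o', 'n'] ++ ':' :: v from rfl,
            splitOnMax_colon (by decide)]
          rfl
        have g1 : (d.insert ['D', 'e', 's', 'c', 'r', 'i', 'p', 't', 'i', 'o', 'n'] v).getD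
            ['T', 'i', 't', 'l', 'e'] [] = d.getD ['T', 'i', 't', 'l', 'e'] [] :=
          PySem.Dict.getD_insert_of_ne d _ _ (by decide)
        have g3 : (d.insert ['D', 'e', 's', 'c', 'r', 'i', 'p', 't', 'i', 'o', 'n'] v).getD
            ['T', 'a', 'g', 's'] [] = d.getD ['T', 'a', 'g', 's'] [] :=
          PySem.Dict.getD_insert_of_ne d _ _ (by decide)
        have hp' : pvPartitionColon ('D' :: 'e' :: 's' :: 'c' :: 'r' :: 'i' :: 'p' :: 't' :: 'i' :: 'o' :: 'n' :: ':' :: v) = some (['D', 'e', 's', 'c', 'r', 'i', 'p', 't', 'i', 'o', 'n'], v) := hp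
        simp [pcStepA, pcStepB, pcExtract, hp', s1, s2, hget, g1, g3, PySem.Dict.getD_insert_self]
      · by_cases h3 : (['T', 'a', 'g', 's'] : List Char) = k
        · subst h3
          have s1 : PySem.Chars.startswith ('T' :: 'a' :: 'g' :: 's' :: ':' :: v)
              ['T', 'i', 't', 'l', 'e', ':'] = false :=
            startswith_key_ne (k := ['T', 'a', 'g', 's']) (v := v) (t := ['T', 'i', 't', 'l', 'e']) (by decide) (by decide) (by decide)
          have s2 : PySem.Chars.startswith ('T' :: 'a' :: 'g' :: 's' :: ':' :: v)
              ['D', 'e', 's', 'c', 'r', 'i', 'p', 't', 'i', 'o', 'n', ':'] = false :=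
            startswith_key_ne (k := ['T', 'a', 'g', 's']) (v := v) (t := ['D', 'e', 's', 'c', 'r', 'i', 'p', 't', 'i', 'o', 'n']) (by decide) (by decide) (by decide)
          have s3 : PySem.Chars.startswith ('T' :: 'a' :: 'g' :: 's' :: ':' :: v)
              ['T', 'a', 'g', 's', ':'] = true :=
            startswith_key_self (k := ['T', 'a', 'g', 's']) (v := v) (by decide)
          have hget : PySem.List.pyGetD
              (PySem.Chars.splitOnMax ('T' :: 'a' :: 'g' :: 's' :: ':' :: v) [':'] 1) 1 [] = v := by
            rw [show ('T' :: 'a' :: 'g' :: 's' :: ':' :: v : List Char)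
                  = ['T', 'a', 'g', 's'] ++ ':' :: v from rfl,
              splitOnMax_colon (by decide)]
            rfl
          have g1 : (d.insert ['T', 'a', 'g', 's'] v).getD ['T', 'i', 't', 'l', 'e'] []
                = d.getD ['T', 'i', 't', 'l', 'e'] [] :=
            PySem.Dict.getD_insert_of_ne d _ _ (by decide)
          have g2 : (d.insert ['T', 'a', 'g', 's'] v).getD
              ['D', 'e', 's', 'c', 'r', 'i', 'p', 't', 'i', 'o', 'n'] []
                = d.getD ['D', 'e', 's', 'c', 'r', 'i', 'p', 't', 'i', 'o', 'n'] [] :=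
            PySem.Dict.getD_insert_of_ne d _ _ (by decide)
          have hp' : pvPartitionColon ('T' :: 'a' :: 'g' :: 's' :: ':' :: v) = some (['T', 'a', 'g', 's'], v) := hp
          simp [pcStepA, pcStepB, pcExtract, hp', s1, s2, s3, hget, g1, g2,
            PySem.Dict.getD_insert_self]
        · have s1 : PySem.Chars.startswith (k ++ ':' :: v) ['T', 'i', 't', 'l', 'e', ':'] = false :=
            startswith_key_ne (t := ['T', 'i', 't', 'l', 'e']) hk (by decide) h1
          have s2 : PySem.Chars.startswith (k ++ ':' :: v)
              ['D', 'e', 's', 'c', 'r', 'i', 'p', 't', 'i', 'o', 'n', ':'] = false :=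
            startswith_key_ne (t := ['D', 'e', 's', 'c', 'r', 'i', 'p', 't', 'i', 'o', 'n']) hk (by decide) h2
          have s3 : PySem.Chars.startswith (k ++ ':' :: v) ['T', 'a', 'g', 's', ':'] = false :=
            startswith_key_ne (t := ['T', 'a', 'g', 's']) hk (by decide) h3
          have g1 : (d.insert k v).getD ['T', 'i', 't', 'l', 'e'] []
                = d.getD ['T', 'i', 't', 'l', 'e'] [] := PySem.Dict.getD_insert_of_ne d _ _ h1
          have g2 : (d.insert k v).getD ['D', 'e', 's', 'c', 'r', 'i', 'p', 't', 'i', 'o', 'n'] []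
                = d.getD ['D', 'e', 's', 'c', 'r', 'i', 'p', 't', 'i', 'o', 'n'] [] :=
            PySem.Dict.getD_insert_of_ne d _ _ h2
          have g3 : (d.insert k v).getD ['T', 'a', 'g', 's'] [] = d.getD ['T', 'a', 'g', 's'] [] :=
            PySem.Dict.getD_insert_of_ne d _ _ h3
          simp [pcStepA, pcStepB, pcExtract, hp, s1, s2, s3, g1, g2, g3]

theorem fold_commutes (lines : List (List Char)) :
    ∀ d, lines.foldl pcStepA (pcExtract d) = pcExtract (lines.foldl pcStepB d) := by
  induction lines with
  | nil => intro d; rfl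
  | cons line rest ih =>
    intro d
    rw [List.foldl_cons, List.foldl_cons, step_commutes, ih]

theorem extract_empty : pcExtract PySem.Dict.empty = ([], [], []) := by decide

-- ===== VERDICT (by name: the statement is the Claim_ definition above) =====
theorem parse_caption_spec : Claim_equal_parse_caption := by
  intro s _
  unfold Spec_parse_caption parse_caption parse_caption_alt
  have h := fold_commutes (PySem.Chars.splitlines s.toList) PySem.Dict.empty
  rw [extract_empty] at h
  simp only [h, pcExtract]
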